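-- pv_equiv track=rewrite | github.com/modrzejewski/gammcor-integrals | src/integrals/Auto2e/Auto2e.py | RCopy_Subroutine
-- ===== SOURCE A (Python) =====
-- def tuvindices(MaxIndex):
--     """ Indices of the Rtuv and Stuv matrices """
--     TUVIdx = {}
--     Idx = 1
--     for v in range(MaxIndex+1):
--         for u in range(MaxIndex-v+1):
--             for t in range(MaxIndex-v-u+1):
--                 TUVIdx[(t, u, v)] = Idx
--                 Idx += 1
--     return TUVIdx
--
-- def RCopy_Subroutine(LBra, LKet):
--     SIdx = tuvindices(LBra)
--     loop = ""
--     k = 1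
--     for v in range(LBra+1):
--         for u in range(LBra+1-v):
--             MaxT = LBra - u - v
--             i0 = SIdx[(0, u, v)]
--             i1 = SIdx[(MaxT, u, v)]
--             if MaxT >= 1:
--                 loop += "T({i0}:{i1}) = R(idx({k}):idx({k})+{MaxT})\n".format(i0=i0, i1=i1, k=k, MaxT=MaxT)
--             else:
--                 loop += "T({i0}) = R(idx({k}))\n".format(i0=i0, k=k)
--             k += 1
--     Subroutine = """
-- subroutine auto2e_RCopy_{LBra}_{LKet}(T, R, idx)
-- real(F64), dimension(:), intent(out) :: T
-- real(F64), dimension(:), intent(in) :: R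
-- integer, dimension(:), intent(in) :: idx
-- {loop}end subroutine auto2e_RCopy_{LBra}_{LKet}
-- """.format(loop=loop, LBra=LBra, LKet=LKet)
--     return Subroutine
-- ===== SOURCE B (Python) =====
-- def RCopy_Subroutine(LBra, LKet):
--     # The tuv indices are assigned consecutively in exactly the (v, u) block
--     # order this loop visits, so a running position counter replaces the
--     # cubic-size index table A precomputes.
--     loop = ""
--     k = 1
--     pos = 1
--     for v in range(LBra + 1):
--         for u in range(LBra + 1 - v):
--             MaxT = LBra - u - v
--             if MaxT >= 1:
--                 loop += "T({i0}:{i1}) = R(idx({k}):idx({k})+{MaxT})\n".format(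
--                     i0=pos, i1=pos + MaxT, k=k, MaxT=MaxT)
--             else:
--                 loop += "T({i0}) = R(idx({k}))\n".format(i0=pos, k=k)
--             k += 1
--             pos += MaxT + 1
--     Subroutine = """
-- subroutine auto2e_RCopy_{LBra}_{LKet}(T, R, idx)
-- real(F64), dimension(:), intent(out) :: T
-- real(F64), dimension(:), intent(in) :: R
-- integer, dimension(:), intent(in) :: idx
-- {loop}end subroutine auto2e_RCopy_{LBra}_{LKet}
-- """.format(loop=loop, LBra=LBra, LKet=LKet)
--     return Subroutine
-- ===== Notes on version B (the rewrite author's own statement) =====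
-- stated objective: faster
-- what changed: B drops the cubic-size tuvindices dictionary entirely: since the tuv indices are assigned consecutively in exactly the (v,u) block order the emitting loop visits, a running position counter yields i0/i1 directly.
import Mathlib
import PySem

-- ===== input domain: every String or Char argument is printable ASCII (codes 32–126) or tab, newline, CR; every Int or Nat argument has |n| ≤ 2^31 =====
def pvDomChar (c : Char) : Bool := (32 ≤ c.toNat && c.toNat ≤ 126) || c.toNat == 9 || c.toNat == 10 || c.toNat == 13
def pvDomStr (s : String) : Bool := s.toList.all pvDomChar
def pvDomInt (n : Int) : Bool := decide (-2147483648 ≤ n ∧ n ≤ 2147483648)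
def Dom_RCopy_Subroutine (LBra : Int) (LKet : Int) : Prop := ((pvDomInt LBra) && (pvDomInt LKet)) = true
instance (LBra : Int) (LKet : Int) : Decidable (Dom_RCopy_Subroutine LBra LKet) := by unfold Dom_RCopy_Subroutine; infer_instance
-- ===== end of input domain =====

-- B replaces A's cubic-size precomputed tuv-index dictionary by a running position
-- counter (the indices are assigned consecutively in exactly the (v,u) block order
-- the emitting loop visits); objective: faster.

-- ===== PORT A =====
-- dict lookups SIdx[(0,u,v)] / SIdx[(MaxT,u,v)] always hit (the key is always
-- present), so Python never raises KeyError here; the port reads them with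
-- (get? …).getD 0, exact on every admitted input.
def tuvindices (MaxIndex : Int) : PySem.Dict (Int × Int × Int) Int :=
  ((PySem.List.pyRange 0 (MaxIndex + 1) 1).foldl
    (fun (st : PySem.Dict (Int × Int × Int) Int × Int) v =>
      (PySem.List.pyRange 0 (MaxIndex - v + 1) 1).foldl
        (fun st u =>
          (PySem.List.pyRange 0 (MaxIndex - v - u + 1) 1).foldl
            (fun st t => (st.1.insert (t, u, v) st.2, st.2 + 1)) st) st)
    (PySem.Dict.empty, 1)).1

def RCopy_Subroutine (LBra : Int) (LKet : Int) : String :=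
  let SIdx := tuvindices LBra
  let st := (PySem.List.pyRange 0 (LBra + 1) 1).foldl
    (fun (st : String × Int) v =>
      (PySem.List.pyRange 0 (LBra + 1 - v) 1).foldl
        (fun (st : String × Int) u =>
          let MaxT := LBra - u - v
          let i0 := (SIdx.get? (0, u, v)).getD 0
          let i1 := (SIdx.get? (MaxT, u, v)).getD 0
          let line := if MaxT ≥ 1 then
              "T(" ++ PySem.Int.toStr i0 ++ ":" ++ PySem.Int.toStr i1 ++ ") = R(idx("
                ++ PySem.Int.toStr st.2 ++ "):idx(" ++ PySem.Int.toStr st.2 ++ ")+"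
                ++ PySem.Int.toStr MaxT ++ ")\n"
            else
              "T(" ++ PySem.Int.toStr i0 ++ ") = R(idx(" ++ PySem.Int.toStr st.2 ++ "))\n"
          (st.1 ++ line, st.2 + 1)) st)
    ("", 1)
  "\nsubroutine auto2e_RCopy_" ++ PySem.Int.toStr LBra ++ "_" ++ PySem.Int.toStr LKet
    ++ "(T, R, idx)\nreal(F64), dimension(:), intent(out) :: T\nreal(F64), dimension(:), intent(in) :: R\ninteger, dimension(:), intent(in) :: idx\n"
    ++ st.1
    ++ "end subroutine auto2e_RCopy_" ++ PySem.Int.toStr LBra ++ "_" ++ PySem.Int.toStr LKet ++ "\n"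

-- ===== PORT B =====
-- state: (loop, k, pos)
def RCopy_Subroutine_alt (LBra : Int) (LKet : Int) : String :=
  let st := (PySem.List.pyRange 0 (LBra + 1) 1).foldl
    (fun (st : String × Int × Int) v =>
      (PySem.List.pyRange 0 (LBra + 1 - v) 1).foldl
        (fun (st : String × Int × Int) u =>
          let MaxT := LBra - u - v
          let line := if MaxT ≥ 1 then
              "T(" ++ PySem.Int.toStr st.2.2 ++ ":" ++ PySem.Int.toStr (st.2.2 + MaxT) ++ ") = R(idx("
                ++ PySem.Int.toStr st.2.1 ++ "):idx(" ++ PySem.Int.toStr st.2.1 ++ ")+"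
                ++ PySem.Int.toStr MaxT ++ ")\n"
            else
              "T(" ++ PySem.Int.toStr st.2.2 ++ ") = R(idx(" ++ PySem.Int.toStr st.2.1 ++ "))\n"
          (st.1 ++ line, st.2.1 + 1, st.2.2 + MaxT + 1)) st)
    ("", 1, 1)
  "\nsubroutine auto2e_RCopy_" ++ PySem.Int.toStr LBra ++ "_" ++ PySem.Int.toStr LKet
    ++ "(T, R, idx)\nreal(F64), dimension(:), intent(out) :: T\nreal(F64), dimension(:), intent(in) :: R\ninteger, dimension(:), intent(in) :: idx\n"
    ++ st.1
    ++ "end subroutine auto2e_RCopy_" ++ PySem.Int.toStr LBra ++ "_" ++ PySem.Int.toStr LKet ++ "\n"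

-- ===== PRECONDITION & SPEC =====
def Spec_RCopy_Subroutine (LBra : Int) (LKet : Int) (out : String) : Prop := out = RCopy_Subroutine_alt LBra LKet
instance (LBra : Int) (LKet : Int) (out : String) : Decidable (Spec_RCopy_Subroutine LBra LKet out) := by unfold Spec_RCopy_Subroutine; infer_instance

-- ===== CLAIM (what is proved, stated in full; the proofs are below) =====
def Claim_equal_RCopy_Subroutine : Prop := ∀ (LBra : Int) (LKet : Int), Dom_RCopy_Subroutine LBra LKet → Spec_RCopy_Subroutine LBra LKet (RCopy_Subroutine LBra LKet)

-- ===== LEMMAS AND PROOFS =====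

-- running-position bookkeeping: pvRowSum M v u = number of (t) entries in the rows
-- u' < u of layer v; pvLayerSum M v = number of entries in the layers v' < v.
def pvRowSum (M v : Int) (u : Nat) : Int :=
  ((List.range u).map (fun u' => ((M - v - (u' : Int) + 1).toNat : Int))).sum

def pvLayerSum (M : Int) (v : Nat) : Int :=
  ((List.range v).map (fun v' => pvRowSum M (v' : Int) ((M - (v' : Int) + 1).toNat))).sum

def pvStart (M : Int) (v u : Nat) : Int := 1 + pvLayerSum M v + pvRowSum M (v : Int) u

lemma pvRange_toNat (a : Int) :
    PySem.List.pyRange 0 a 1 = PySem.List.pyRange 0 ((a.toNat : Int)) 1 := by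
  by_cases h : 0 ≤ a
  · rw [Int.toNat_of_nonneg h]
  · rw [PySem.List.pyRange_of_pos 0 a Int.one_pos,
        PySem.List.pyRange_of_pos 0 ((a.toNat : Int)) Int.one_pos]
    have h0 : a.toNat = 0 := by omega
    have h1 : ¬ (0 : Int) < a := by omega
    simp [h0, h1]

lemma pvRowSum_succ (M v : Int) (u : Nat) :
    pvRowSum M v (u + 1) = pvRowSum M v u + ((M - v - (u : Int) + 1).toNat : Int) := by
  simp [pvRowSum, List.range_succ]

lemma pvLayerSum_succ (M : Int) (v : Nat) :
    pvLayerSum M (v + 1) = pvLayerSum M v + pvRowSum M (v : Int) ((M - (v : Int) + 1).toNat) := by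
  simp [pvLayerSum, List.range_succ]

-- inner (t) loop: the counter advances by n and the keys (t,u,v), t < n, get
-- consecutive indices starting at i; other (u,v) keys are untouched.
lemma pv_inner_snd (u v i : Int) (d : PySem.Dict (Int × Int × Int) Int) (n : Nat) :
    ((PySem.List.pyRange 0 ((n : Int)) 1).foldl
      (fun st t => (st.1.insert (t, u, v) st.2, st.2 + 1)) (d, i)).2 = i + n := by
  induction n with
  | zero => simp [PySem.List.pyRange]
  | succ n ih =>
    have hc : ((n + 1 : Nat) : Int) = (n : Int) + 1 := by push_cast; ring
    rw [hc, PySem.List.pyRange_one_succ_right (by positivity), List.foldl_append]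
    simp only [List.foldl]
    rw [ih]; omega

lemma pv_inner_get (u v i : Int) (d : PySem.Dict (Int × Int × Int) Int) (n : Nat) :
    (∀ t : Nat, t < n →
      ((PySem.List.pyRange 0 ((n : Int)) 1).foldl
        (fun st t => (st.1.insert (t, u, v) st.2, st.2 + 1)) (d, i)).1.get? ((t : Int), u, v)
        = some (i + t)) ∧
    (∀ key : Int × Int × Int, key.2 ≠ (u, v) →
      ((PySem.List.pyRange 0 ((n : Int)) 1).foldl
        (fun st t => (st.1.insert (t, u, v) st.2, st.2 + 1)) (d, i)).1.get? key = d.get? key) := by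
  induction n with
  | zero =>
    refine ⟨fun t ht => absurd ht (by omega), fun key _ => by simp [PySem.List.pyRange]⟩
  | succ n ih =>
    have hc : ((n + 1 : Nat) : Int) = (n : Int) + 1 := by push_cast; ring
    rw [hc, PySem.List.pyRange_one_succ_right (by positivity), List.foldl_append]
    simp only [List.foldl]
    obtain ⟨iha, ihb⟩ := ih
    have hsnd := pv_inner_snd u v i d n
    constructor
    · intro t ht
      rcases Nat.lt_succ_iff_lt_or_eq.mp ht with h | h
      · rw [PySem.Dict.get?_insert_of_ne _ _ (by
          intro hk
          have : (t : Int) = (n : Int) := congrArg Prod.fst hk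
          omega)]
        exact iha t h
      · subst h
        rw [PySem.Dict.get?_insert_self, hsnd]
    · intro key hkey
      rw [PySem.Dict.get?_insert_of_ne _ _ (by
        intro hk
        exact hkey (by rw [hk]))]
      exact ihb key hkey

-- middle (u) loop of the dict build
lemma pv_mid_snd (M v i : Int) (d : PySem.Dict (Int × Int × Int) Int) (nu : Nat) :
    ((PySem.List.pyRange 0 ((nu : Int)) 1).foldl
      (fun st u => (PySem.List.pyRange 0 (M - v - u + 1) 1).foldl
        (fun st t => (st.1.insert (t, u, v) st.2, st.2 + 1)) st) (d, i)).2
      = i + pvRowSum M v nu := by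
  induction nu with
  | zero => simp [PySem.List.pyRange, pvRowSum]
  | succ nu ih =>
    have hc : ((nu + 1 : Nat) : Int) = (nu : Int) + 1 := by push_cast; ring
    rw [hc, PySem.List.pyRange_one_succ_right (by positivity), List.foldl_append]
    simp only [List.foldl]
    rw [pvRange_toNat (M - v - (nu : Int) + 1), pv_inner_snd, ih, pvRowSum_succ]
    ring

lemma pv_mid_get (M v i : Int) (d : PySem.Dict (Int × Int × Int) Int) (nu : Nat) :
    (∀ u : Nat, u < nu → ∀ t : Int, 0 ≤ t → t ≤ M - v - u →
      ((PySem.List.pyRange 0 ((nu : Int)) 1).foldl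
        (fun st u => (PySem.List.pyRange 0 (M - v - u + 1) 1).foldl
          (fun st t => (st.1.insert (t, u, v) st.2, st.2 + 1)) st) (d, i)).1.get? (t, (u : Int), v)
        = some (i + pvRowSum M v u + t)) ∧
    (∀ key : Int × Int × Int, key.2.2 ≠ v →
      ((PySem.List.pyRange 0 ((nu : Int)) 1).foldl
        (fun st u => (PySem.List.pyRange 0 (M - v - u + 1) 1).foldl
          (fun st t => (st.1.insert (t, u, v) st.2, st.2 + 1)) st) (d, i)).1.get? key
        = d.get? key) := by
  induction nu with
  | zero =>
    refine ⟨fun u hu => absurd hu (by omega), fun key _ => by simp [PySem.List.pyRange]⟩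
  | succ nu ih =>
    have hc : ((nu + 1 : Nat) : Int) = (nu : Int) + 1 := by push_cast; ring
    rw [hc, PySem.List.pyRange_one_succ_right (by positivity), List.foldl_append]
    simp only [List.foldl]
    rw [pvRange_toNat (M - v - (nu : Int) + 1)]
    obtain ⟨iha, ihb⟩ := ih
    have hsnd := pv_mid_snd M v i d nu
    set F := (PySem.List.pyRange 0 ((nu : Int)) 1).foldl
        (fun st u => (PySem.List.pyRange 0 (M - v - u + 1) 1).foldl
          (fun st t => (st.1.insert (t, u, v) st.2, st.2 + 1)) st) (d, i) with hF
    obtain ⟨ina, inb⟩ := pv_inner_get ((nu : Int)) v F.2 F.1 ((M - v - (nu : Int) + 1).toNat)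
    constructor
    · intro u hu t ht0 ht
      rcases Nat.lt_succ_iff_lt_or_eq.mp hu with h | h
      · rw [inb (t, (u : Int), v) (by
          intro hk
          have : (u : Int) = (nu : Int) := congrArg Prod.fst hk
          omega)]
        exact iha u h t ht0 ht
      · subst h
        have h1 : t.toNat < (M - v - (u : Int) + 1).toNat := by omega
        have h2 := ina t.toNat h1
        have h3 : ((t.toNat : Nat) : Int) = t := by omega
        rw [h3] at h2
        rw [h2, hsnd]
    · intro key hkey
      rw [inb key (by
        intro hk
        exact hkey (congrArg Prod.snd hk))]
      exact ihb key hkey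

-- outer (v) loop of the dict build
lemma pv_outer_snd (M i : Int) (d : PySem.Dict (Int × Int × Int) Int) (nv : Nat) :
    ((PySem.List.pyRange 0 ((nv : Int)) 1).foldl
      (fun st v => (PySem.List.pyRange 0 (M - v + 1) 1).foldl
        (fun st u => (PySem.List.pyRange 0 (M - v - u + 1) 1).foldl
          (fun st t => (st.1.insert (t, u, v) st.2, st.2 + 1)) st) st) (d, i)).2
      = i + pvLayerSum M nv := by
  induction nv with
  | zero => simp [PySem.List.pyRange, pvLayerSum]
  | succ nv ih =>
    have hc : ((nv + 1 : Nat) : Int) = (nv : Int) + 1 := by push_cast; ring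
    rw [hc, PySem.List.pyRange_one_succ_right (by positivity), List.foldl_append]
    simp only [List.foldl]
    rw [pvRange_toNat (M - (nv : Int) + 1), pv_mid_snd, ih, pvLayerSum_succ]
    ring

lemma pv_outer_get (M i : Int) (d : PySem.Dict (Int × Int × Int) Int) (nv : Nat) :
    ∀ v : Nat, v < nv → ∀ u : Nat, (u : Int) ≤ M - v → ∀ t : Int, 0 ≤ t → t ≤ M - v - u →
      ((PySem.List.pyRange 0 ((nv : Int)) 1).foldl
        (fun st v => (PySem.List.pyRange 0 (M - v + 1) 1).foldl
          (fun st u => (PySem.List.pyRange 0 (M - v - u + 1) 1).foldl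
            (fun st t => (st.1.insert (t, u, v) st.2, st.2 + 1)) st) st) (d, i)).1.get? (t, (u : Int), (v : Int))
        = some (i + pvLayerSum M v + pvRowSum M (v : Int) u + t) := by
  induction nv with
  | zero => exact fun v hv => absurd hv (by omega)
  | succ nv ih =>
    intro v hv u hu t ht0 ht
    have hc : ((nv + 1 : Nat) : Int) = (nv : Int) + 1 := by push_cast; ring
    rw [hc, PySem.List.pyRange_one_succ_right (by positivity), List.foldl_append]
    simp only [List.foldl]
    rw [pvRange_toNat (M - (nv : Int) + 1)]
    have hsnd := pv_outer_snd M i d nv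
    set F := (PySem.List.pyRange 0 ((nv : Int)) 1).foldl
      (fun st v => (PySem.List.pyRange 0 (M - v + 1) 1).foldl
        (fun st u => (PySem.List.pyRange 0 (M - v - u + 1) 1).foldl
          (fun st t => (st.1.insert (t, u, v) st.2, st.2 + 1)) st) st) (d, i) with hF
    obtain ⟨mida, midb⟩ := pv_mid_get M ((nv : Int)) F.2 F.1 ((M - (nv : Int) + 1).toNat)
    rcases Nat.lt_succ_iff_lt_or_eq.mp hv with h | h
    · rw [midb (t, (u : Int), (v : Int)) (by
        intro hk
        have : (v : Int) = (nv : Int) := hk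
        omega)]
      exact ih v h u hu t ht0 ht
    · subst h
      rw [mida u (by omega) t ht0 ht, hsnd]

-- the table A builds, characterised
lemma pv_tuv_get (M : Int) (v u : Nat) (t : Int)
    (hv : (v : Int) ≤ M) (hu : (u : Int) ≤ M - v) (ht0 : 0 ≤ t) (ht : t ≤ M - v - u) :
    (tuvindices M).get? (t, (u : Int), (v : Int)) = some (pvStart M v u + t) := by
  have h := pv_outer_get M 1 PySem.Dict.empty ((M + 1).toNat) v (by omega) u hu t ht0 ht
  unfold tuvindices
  rw [pvRange_toNat (M + 1)]
  simpa [pvStart, add_assoc] using h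

-- the emitting loops agree: B's third state component tracks pvStart
lemma pv_loop_inner (M : Int) (v : Nat) (hv : (v : Int) ≤ M) (nu : Nat)
    (hnu : (nu : Int) ≤ M - (v : Int) + 1) (s : String) (k : Int) :
    (PySem.List.pyRange 0 ((nu : Int)) 1).foldl
      (fun (st : String × Int × Int) u =>
        let MaxT := M - u - v
        let line := if MaxT ≥ 1 then
            "T(" ++ PySem.Int.toStr st.2.2 ++ ":" ++ PySem.Int.toStr (st.2.2 + MaxT) ++ ") = R(idx("
              ++ PySem.Int.toStr st.2.1 ++ "):idx(" ++ PySem.Int.toStr st.2.1 ++ ")+"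
              ++ PySem.Int.toStr MaxT ++ ")\n"
          else
            "T(" ++ PySem.Int.toStr st.2.2 ++ ") = R(idx(" ++ PySem.Int.toStr st.2.1 ++ "))\n"
        (st.1 ++ line, st.2.1 + 1, st.2.2 + MaxT + 1)) (s, k, pvStart M v 0)
    = (((PySem.List.pyRange 0 ((nu : Int)) 1).foldl
        (fun (st : String × Int) u =>
          let MaxT := M - u - v
          let i0 := ((tuvindices M).get? (0, u, (v : Int))).getD 0
          let i1 := ((tuvindices M).get? (MaxT, u, (v : Int))).getD 0
          let line := if MaxT ≥ 1 then
              "T(" ++ PySem.Int.toStr i0 ++ ":" ++ PySem.Int.toStr i1 ++ ") = R(idx("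
                ++ PySem.Int.toStr st.2 ++ "):idx(" ++ PySem.Int.toStr st.2 ++ ")+"
                ++ PySem.Int.toStr MaxT ++ ")\n"
            else
              "T(" ++ PySem.Int.toStr i0 ++ ") = R(idx(" ++ PySem.Int.toStr st.2 ++ "))\n"
          (st.1 ++ line, st.2 + 1)) (s, k)).1,
       ((PySem.List.pyRange 0 ((nu : Int)) 1).foldl
        (fun (st : String × Int) u =>
          let MaxT := M - u - v
          let i0 := ((tuvindices M).get? (0, u, (v : Int))).getD 0
          let i1 := ((tuvindices M).get? (MaxT, u, (v : Int))).getD 0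
          let line := if MaxT ≥ 1 then
              "T(" ++ PySem.Int.toStr i0 ++ ":" ++ PySem.Int.toStr i1 ++ ") = R(idx("
                ++ PySem.Int.toStr st.2 ++ "):idx(" ++ PySem.Int.toStr st.2 ++ ")+"
                ++ PySem.Int.toStr MaxT ++ ")\n"
            else
              "T(" ++ PySem.Int.toStr i0 ++ ") = R(idx(" ++ PySem.Int.toStr st.2 ++ "))\n"
          (st.1 ++ line, st.2 + 1)) (s, k)).2,
       pvStart M v nu) := by
  revert hnu
  induction nu with
  | zero => intro _; simp [PySem.List.pyRange]
  | succ nu ih =>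
    intro hnu
    have hc : ((nu + 1 : Nat) : Int) = (nu : Int) + 1 := by push_cast; ring
    rw [hc, PySem.List.pyRange_one_succ_right (by positivity)]
    simp only [List.foldl_append, List.foldl]
    rw [ih (by omega)]
    have h0 := pv_tuv_get M v nu 0 hv (by omega) le_rfl (by omega)
    have h1 := pv_tuv_get M v nu (M - (nu : Int) - (v : Int)) hv (by omega) (by omega) (by omega)
    simp only [h0, h1, Option.getD_some, add_zero, Prod.mk.injEq]
    refine ⟨trivial, trivial, ?_⟩
    have hr := pvRowSum_succ M (v : Int) nu
    simp only [pvStart]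
    omega

lemma pv_loop_outer (M : Int) (nv : Nat) (hnv : (nv : Int) ≤ M + 1) :
    (PySem.List.pyRange 0 ((nv : Int)) 1).foldl
      (fun (st : String × Int × Int) v =>
        (PySem.List.pyRange 0 (M + 1 - v) 1).foldl
          (fun (st : String × Int × Int) u =>
            let MaxT := M - u - v
            let line := if MaxT ≥ 1 then
                "T(" ++ PySem.Int.toStr st.2.2 ++ ":" ++ PySem.Int.toStr (st.2.2 + MaxT) ++ ") = R(idx("
                  ++ PySem.Int.toStr st.2.1 ++ "):idx(" ++ PySem.Int.toStr st.2.1 ++ ")+"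
                  ++ PySem.Int.toStr MaxT ++ ")\n"
              else
                "T(" ++ PySem.Int.toStr st.2.2 ++ ") = R(idx(" ++ PySem.Int.toStr st.2.1 ++ "))\n"
            (st.1 ++ line, st.2.1 + 1, st.2.2 + MaxT + 1)) st) ("", 1, 1)
    = (((PySem.List.pyRange 0 ((nv : Int)) 1).foldl
        (fun (st : String × Int) v =>
          (PySem.List.pyRange 0 (M + 1 - v) 1).foldl
            (fun (st : String × Int) u =>
              let MaxT := M - u - v
              let i0 := ((tuvindices M).get? (0, u, v)).getD 0
              let i1 := ((tuvindices M).get? (MaxT, u, v)).getD 0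
              let line := if MaxT ≥ 1 then
                  "T(" ++ PySem.Int.toStr i0 ++ ":" ++ PySem.Int.toStr i1 ++ ") = R(idx("
                    ++ PySem.Int.toStr st.2 ++ "):idx(" ++ PySem.Int.toStr st.2 ++ ")+"
                    ++ PySem.Int.toStr MaxT ++ ")\n"
                else
                  "T(" ++ PySem.Int.toStr i0 ++ ") = R(idx(" ++ PySem.Int.toStr st.2 ++ "))\n"
              (st.1 ++ line, st.2 + 1)) st) ("", 1)).1,
       ((PySem.List.pyRange 0 ((nv : Int)) 1).foldl
        (fun (st : String × Int) v =>
          (PySem.List.pyRange 0 (M + 1 - v) 1).foldl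
            (fun (st : String × Int) u =>
              let MaxT := M - u - v
              let i0 := ((tuvindices M).get? (0, u, v)).getD 0
              let i1 := ((tuvindices M).get? (MaxT, u, v)).getD 0
              let line := if MaxT ≥ 1 then
                  "T(" ++ PySem.Int.toStr i0 ++ ":" ++ PySem.Int.toStr i1 ++ ") = R(idx("
                    ++ PySem.Int.toStr st.2 ++ "):idx(" ++ PySem.Int.toStr st.2 ++ ")+"
                    ++ PySem.Int.toStr MaxT ++ ")\n"
                else
                  "T(" ++ PySem.Int.toStr i0 ++ ") = R(idx(" ++ PySem.Int.toStr st.2 ++ "))\n"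
              (st.1 ++ line, st.2 + 1)) st) ("", 1)).2,
       1 + pvLayerSum M nv) := by
  revert hnv
  induction nv with
  | zero => intro _; simp [PySem.List.pyRange, pvLayerSum]
  | succ nv ih =>
    intro hnv
    have hc : ((nv + 1 : Nat) : Int) = (nv : Int) + 1 := by push_cast; ring
    rw [hc, PySem.List.pyRange_one_succ_right (by positivity)]
    simp only [List.foldl_append, List.foldl]
    rw [ih (by omega)]
    have he : M + 1 - ((nv : Nat) : Int) = M - (nv : Int) + 1 := by ring
    rw [he, pvRange_toNat (M - (nv : Int) + 1)]
    have hstart : pvStart M nv 0 = 1 + pvLayerSum M nv := by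
      simp [pvStart, pvRowSum]
    rw [← hstart,
        pv_loop_inner M nv (by omega) ((M - (nv : Int) + 1).toNat) (by omega)]
    simp only [Prod.mk.injEq]
    refine ⟨trivial, trivial, ?_⟩
    rw [pvLayerSum_succ]
    simp [pvStart]
    omega

-- ===== VERDICT (by name: the statement is the Claim_ definition above) =====
theorem RCopy_Subroutine_spec : Claim_equal_RCopy_Subroutine := by
  intro LBra LKet _
  unfold Spec_RCopy_Subroutine RCopy_Subroutine RCopy_Subroutine_alt
  by_cases hL : 0 ≤ LBra + 1
  · rw [pvRange_toNat (LBra + 1),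
        pv_loop_outer LBra ((LBra + 1).toNat) (by omega)]
  · have h0 : (LBra + 1).toNat = 0 := by omega
    rw [pvRange_toNat (LBra + 1), h0]
    simp [PySem.List.pyRange]
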